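-- pv_equiv track=rewrite | github.com/wanlok/unimelb-research-project | dummy.py | is_security_related_text
-- ===== SOURCE A (Python) =====
-- security_related_keywords = ['access policy', 'access role', 'access-policy', 'access-role', 'accesspolicy', 'accessrole', 'aes', 'audit', 'authentic', 'authority', 'authoriz', 'biometric', 'black list', 'black-list', 'blacklist', 'blacklist', 'cbc', 'certificate', 'checksum', 'cipher', 'clearance', 'confidentiality', 'cookie', 'crc', 'credential', 'crypt', 'csrf', 'decode', 'defensive programming', 'defensive-programming', 'delegation', 'denial of service', 'denial-of-service', 'diffie-hellman', 'dmz', 'dotfuscator', 'dsa', 'ecdsa', 'encode', 'escrow', 'exploit', 'firewall', 'forge', 'forgery', 'gss api', 'gss-api', 'gssapi', 'hack', 'hash', 'hmac', 'honey pot', 'honey-pot', 'honeypot', 'inject', 'integrity', 'kerberos', 'ldap', 'login', 'malware', 'md5', 'nonce', 'nss', 'oauth', 'obfuscat', 'open auth', 'open-auth', 'openauth', 'openid', 'owasp', 'password', 'pbkdf2', 'pgp', 'phishing', 'pki', 'privacy', 'private key', 'private-key', 'privatekey', 'privilege', 'public key', 'public-key', 'publickey', 'rbac', 'rc4', 'repudiation',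 'rfc 2898', 'rfc-2898', 'rfc2898', 'rijndael', 'rootkit', 'rsa', 'salt', 'saml', 'sanitiz', 'secur', 'sha', 'shell code', 'shell-code', 'shellcode', 'shibboleth', 'signature', 'signed', 'signing', 'sing sign-on', 'single sign on', 'single-sign-on', 'smart assembly', 'smart-assembly', 'smartassembly', 'snif', 'spam', 'spnego', 'spoofing', 'spyware', 'ssl', 'sso', 'steganography', 'tampering', 'trojan', 'trust', 'violat', 'virus', 'white list', 'white-list', 'whitelist', 'x509', 'xss']
--
-- def is_security_related_text(text):
--     security_related = False
--     words = list(map(lambda x: x.lower(), text.split(' ')))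
--     for keyword in security_related_keywords:
--         keyword = keyword.lower()
--         keyword_length = len(keyword)
--         for i in range(len(words)):
--             word = words[i]
--             if (keyword_length == 3 and keyword == word) or (keyword_length > 3 and keyword in word):
--                 security_related = True
--                 break
--             else:
--                 slices = keyword.split(' ')
--                 if slices == words[i:i + len(slices)]:
--                     security_related = True
--                     break
--         if security_related:
--             break
--     return security_related
-- ===== SOURCE B (Python) =====
-- # B: a single pass over the words with the keyword list pre-partitioned (exact
-- # 3-letter keywords in a frozenset, substring keywords, multi-word phrases checked
-- # against the current suffix), instead of A's keyword-outer double loop that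
-- # re-splits and re-measures every keyword per word.
--
-- _EXACT3 = frozenset(['aes', 'cbc', 'crc', 'dmz', 'dsa', 'md5', 'nss', 'pgp', 'pki', 'rc4', 'rsa', 'sha', 'ssl', 'sso', 'xss'])
--
-- _SUBSTR = ('access-policy', 'access-role', 'accesspolicy', 'accessrole', 'audit', 'authentic', 'authority', 'authoriz', 'biometric', 'black-list', 'blacklist', 'certificate', 'checksum', 'cipher', 'clearance', 'confidentiality', 'cookie', 'credential', 'crypt', 'csrf', 'decode', 'defensive-programming', 'delegation', 'denial-of-service', 'diffie-hellman', 'dotfuscator', 'ecdsa', 'encode', 'escrow', 'exploit', 'firewall', 'forge', 'forgery', 'gss-api', 'gssapi', 'hack', 'hash', 'hmac', 'honey-pot', 'honeypot', 'inject', 'integrity', 'kerberos', 'ldap', 'login', 'malware', 'nonce', 'oauth', 'obfuscat', 'open-auth', 'openauth', 'openid', 'owasp', 'password', 'pbkdf2', 'phishing', 'privacy', 'private-key', 'privatekey', 'privilege', 'public-key', 'publickey', 'rbac', 'repudiation', 'rfc-2898', 'rfc2898', 'rijndael', 'rootkit', 'salt', 'saml', 'sanitiz', 'secur', 'shell-code',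 'shellcode', 'shibboleth', 'signature', 'signed', 'signing', 'single-sign-on', 'smart-assembly', 'smartassembly', 'snif', 'spam', 'spnego', 'spoofing', 'spyware', 'steganography', 'tampering', 'trojan', 'trust', 'violat', 'virus', 'white-list', 'whitelist', 'x509')
--
-- _PHRASES = (('access', ['policy']), ('access', ['role']), ('black', ['list']), ('defensive', ['programming']), ('denial', ['of', 'service']), ('gss', ['api']), ('honey', ['pot']), ('open', ['auth']), ('private', ['key']), ('public', ['key']), ('rfc', ['2898']), ('shell', ['code']), ('sing', ['sign-on']), ('single', ['sign', 'on']), ('smart', ['assembly']), ('white', ['list']))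
--
--
-- def is_security_related_text(text):
--     words = [w.lower() for w in text.split(' ')]
--     suffix = words
--     while suffix:
--         w = suffix[0]
--         if w in _EXACT3:
--             return True
--         if any(k in w for k in _SUBSTR):
--             return True
--         for first, rest in _PHRASES:
--             if first == w and suffix[1:1 + len(rest)] == rest:
--                 return True
--         suffix = suffix[1:]
--     return False
-- ===== Notes on version B (the rewrite author's own statement) =====
-- stated objective: alternative
-- what changed: B makes a single pass over the word list (walking suffixes), with the keyword list pre-partitioned once into a frozenset of exact 3-letter keywords, a tuple of substring keywords and multi-word phrases matched against the current suffix, instead of A's keyword-outer double loop that re-lowercases, re-measures and re-splits every keyword for every word.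
import Mathlib
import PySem

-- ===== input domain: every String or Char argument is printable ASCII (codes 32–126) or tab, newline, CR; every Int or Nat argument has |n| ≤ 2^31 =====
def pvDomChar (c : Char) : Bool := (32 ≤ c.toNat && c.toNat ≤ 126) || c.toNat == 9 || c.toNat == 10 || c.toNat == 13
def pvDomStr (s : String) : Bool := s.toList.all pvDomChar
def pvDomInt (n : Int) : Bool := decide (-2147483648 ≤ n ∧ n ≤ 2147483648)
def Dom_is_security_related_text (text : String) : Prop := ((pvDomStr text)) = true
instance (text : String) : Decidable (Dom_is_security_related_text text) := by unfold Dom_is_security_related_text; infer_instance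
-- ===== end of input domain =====

-- B replaces A's keyword-outer double loop by a single pass over the words with the
-- keyword list pre-partitioned (exact 3-letter set, substring keywords, multi-word
-- phrases matched against the current suffix); objective: alternative algorithm, same cost.

-- ===== PORT A =====
def secKeywords : List String := ["access policy", "access role", "access-policy", "access-role", "accesspolicy", "accessrole", "aes", "audit", "authentic", "authority", "authoriz", "biometric", "black list", "black-list", "blacklist", "blacklist", "cbc", "certificate", "checksum", "cipher", "clearance", "confidentiality", "cookie", "crc", "credential", "crypt", "csrf", "decode", "defensive programming", "defensive-programming", "delegation", "denial of service", "denial-of-service", "diffie-hellman", "dmz", "dotfuscator", "dsa", "ecdsa", "encode", "escrow", "exploit", "firewall", "forge", "forgery", "gss api", "gss-api", "gssapi", "hack", "hash", "hmac", "honey pot", "honey-pot", "honeypot", "inject", "integrity", "kerberos", "ldap", "login", "malware", "md5", "nonce", "nss", "oauth", "obfuscat", "open auth", "open-auth", "openauth", "openid", "owasp", "password", "pbkdf2", "pgp", "phishing", "pki", "privacy", "private key", "private-key", "privatekey", "privilege", "public key", "public-key", "publickey", "rbac", "rc4", "repudiation", "rfc 2898", "rfc-2898", "rfc2898", "rijndael",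 "rootkit", "rsa", "salt", "saml", "sanitiz", "secur", "sha", "shell code", "shell-code", "shellcode", "shibboleth", "signature", "signed", "signing", "sing sign-on", "single sign on", "single-sign-on", "smart assembly", "smart-assembly", "smartassembly", "snif", "spam", "spnego", "spoofing", "spyware", "ssl", "sso", "steganography", "tampering", "trojan", "trust", "violat", "virus", "white list", "white-list", "whitelist", "x509", "xss"]

def pvAInner (words : List String) (kw : String) : List Int → Bool
  | [] => false
  | i :: is =>
    let word := PySem.List.pyGetD words i ""
    if (PySem.Str.len kw = 3 ∧ kw = word) ∨ (3 < PySem.Str.len kw ∧ PySem.Str.isIn kw word = true) then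
      true
    else
      -- keyword.split(' '): the separator " " is non-empty, so split? is always `some`
      let slices := (PySem.Str.split? kw " ").getD []
      if slices = PySem.List.slice words (some i) (some (i + (slices.length : Int))) then true
      else pvAInner words kw is

def pvAOuter (words : List String) : List String → Bool
  | [] => false
  | keyword :: ks =>
    let kw := PySem.Str.lower keyword
    if pvAInner words kw (PySem.List.pyRange 0 (words.length : Int) 1) = true then true
    else pvAOuter words ks

def is_security_related_text (text : String) : Bool :=
  let words := ((PySem.Str.split? text " ").getD []).map PySem.Str.lower
  pvAOuter words secKeywords

-- ===== PORT B =====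
def pvExact3 : PySem.Set String := PySem.Set.ofList ["aes", "cbc", "crc", "dmz", "dsa", "md5", "nss", "pgp", "pki", "rc4", "rsa", "sha", "ssl", "sso", "xss"]

def pvSubstrKws : List String := ["access-policy", "access-role", "accesspolicy", "accessrole", "audit", "authentic", "authority", "authoriz", "biometric", "black-list", "blacklist", "certificate", "checksum", "cipher", "clearance", "confidentiality", "cookie", "credential", "crypt", "csrf", "decode", "defensive-programming", "delegation", "denial-of-service", "diffie-hellman", "dotfuscator", "ecdsa", "encode", "escrow", "exploit", "firewall", "forge", "forgery", "gss-api", "gssapi", "hack", "hash", "hmac", "honey-pot", "honeypot", "inject", "integrity", "kerberos", "ldap", "login", "malware", "nonce", "oauth", "obfuscat", "open-auth", "openauth", "openid", "owasp", "password", "pbkdf2", "phishing", "privacy", "private-key", "privatekey", "privilege", "public-key", "publickey", "rbac", "repudiation", "rfc-2898", "rfc2898", "rijndael", "rootkit", "salt", "saml", "sanitiz", "secur", "shell-code", "shellcode", "shibboleth", "signature", "signed", "signing", "single-sign-on", "smart-assembly", "smartassembly", "snif", "spam", "spnego", "spoofing", "spyware", "steganography", "tampering", "trojan", "trust", "violat",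 "virus", "white-list", "whitelist", "x509"]

def pvPhrases : List (String × List String) := [("access", ["policy"]), ("access", ["role"]), ("black", ["list"]), ("defensive", ["programming"]), ("denial", ["of", "service"]), ("gss", ["api"]), ("honey", ["pot"]), ("open", ["auth"]), ("private", ["key"]), ("public", ["key"]), ("rfc", ["2898"]), ("shell", ["code"]), ("sing", ["sign-on"]), ("single", ["sign", "on"]), ("smart", ["assembly"]), ("white", ["list"])]

def pvBScan : List String → Bool
  | [] => false
  | w :: rest =>
    if PySem.Set.contains pvExact3 w then true
    else if pvSubstrKws.any (fun k => PySem.Str.isIn k w) then true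
    else if pvPhrases.any (fun p =>
        p.1 == w && PySem.List.slice (w :: rest) (some 1) (some (1 + (p.2.length : Int))) == p.2) then
      true
    else pvBScan rest

def is_security_related_text_alt (text : String) : Bool :=
  pvBScan (((PySem.Str.split? text " ").getD []).map PySem.Str.lower)

-- ===== PRECONDITION & SPEC =====
def Spec_is_security_related_text (text : String) (out : Bool) : Prop := out = is_security_related_text_alt text
instance (text : String) (out : Bool) : Decidable (Spec_is_security_related_text text out) := by unfold Spec_is_security_related_text; infer_instance

-- ===== CLAIM (what is proved, stated in full; the proofs are below) =====
def Claim_equal_is_security_related_text : Prop := ∀ (text : String), Dom_is_security_related_text text → Spec_is_security_related_text text (is_security_related_text text)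

-- ===== LEMMAS AND PROOFS =====

-- the multi-word keywords of A's list (used only by the proofs)
def pvMulti : List String := ["access policy", "access role", "black list", "defensive programming", "denial of service", "gss api", "honey pot", "open auth", "private key", "public key", "rfc 2898", "shell code", "sing sign-on", "single sign on", "smart assembly", "white list"]

set_option maxRecDepth 40000 in
lemma pv_mem_cat : ∀ k ∈ secKeywords, k ∈ (pvExact3 : List String) ∨ k ∈ pvSubstrKws ∨ k ∈ pvMulti := by decide
lemma pv_cat_mem1 : ∀ k ∈ (pvExact3 : List String), k ∈ secKeywords := by decide
set_option maxRecDepth 40000 in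
lemma pv_cat_mem2 : ∀ k ∈ pvSubstrKws, k ∈ secKeywords := by decide
lemma pv_cat_mem3 : ∀ k ∈ pvMulti, k ∈ secKeywords := by decide
set_option maxRecDepth 40000 in
lemma pv_lower_kw : ∀ k ∈ secKeywords, PySem.Str.lower k = k := by decide
lemma pv_exact3_facts : ∀ k ∈ (pvExact3 : List String), PySem.Str.len k = 3 ∧ (PySem.Str.split? k " ").getD [] = [k] := by decide
lemma pv_substr_facts : ∀ k ∈ pvSubstrKws, 3 < PySem.Str.len k ∧ (PySem.Str.split? k " ").getD [] = [k] := by decide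
lemma pv_multi_facts : ∀ k ∈ pvMulti, PySem.Str.len k ≠ 3 ∧ ' ' ∈ k.toList := by decide
lemma pv_multi_split : pvMulti.map (fun k => (PySem.Str.split? k " ").getD []) = pvPhrases.map (fun p => p.1 :: p.2) := by decide

-- A's per-(keyword, index) test, as a proposition
def AcondAt (words : List String) (kw : String) (i : Int) : Prop :=
  (PySem.Str.len kw = 3 ∧ kw = PySem.List.pyGetD words i "") ∨
  (3 < PySem.Str.len kw ∧ PySem.Str.isIn kw (PySem.List.pyGetD words i "") = true) ∨
  ((PySem.Str.split? kw " ").getD [] =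
    PySem.List.slice words (some i) (some (i + ((((PySem.Str.split? kw " ").getD []).length : Nat) : Int))))

-- A's per-(keyword, suffix) test, suffix form
def CAp (k w : String) (rest : List String) : Prop :=
  (PySem.Str.len k = 3 ∧ k = w) ∨
  (3 < PySem.Str.len k ∧ PySem.Str.isIn k w = true) ∨
  ((PySem.Str.split? k " ").getD [] = (w :: rest).take ((PySem.Str.split? k " ").getD []).length)

-- B's head test
def hbHead (w : String) (rest : List String) : Bool :=
  PySem.Set.contains pvExact3 w || pvSubstrKws.any (fun k => PySem.Str.isIn k w) ||
  pvPhrases.any (fun p =>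
    p.1 == w && PySem.List.slice (w :: rest) (some 1) (some (1 + (p.2.length : Int))) == p.2)

lemma pv_slice_one {w : String} {rest : List String} (n : Nat) :
    PySem.List.slice (w :: rest) (some 1) (some (1 + (n : Int))) = rest.take n := by
  have h := PySem.List.slice_natCast_add (w :: rest) 1 n
  simpa using h

lemma pv_head_equiv (w : String) (rest : List String) (hw : ' ' ∉ w.toList) :
    (∃ k ∈ secKeywords, CAp k w rest) ↔ hbHead w rest = true := by
  constructor
  · rintro ⟨k, hk, hca⟩
    rcases pv_mem_cat k hk with h3 | hs | hm
    · obtain ⟨hlen, hsplit⟩ := pv_exact3_facts k h3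
      have hkw : k = w := by
        rcases hca with ⟨_, h⟩ | ⟨h, _⟩ | h
        · exact h
        · omega
        · rw [hsplit] at h; simpa using h
      subst hkw
      simp only [hbHead, Bool.or_eq_true]
      exact Or.inl (Or.inl (by simpa [PySem.Set.contains_iff] using h3))
    · obtain ⟨hlen, hsplit⟩ := pv_substr_facts k hs
      have hin : PySem.Str.isIn k w = true := by
        rcases hca with ⟨h, _⟩ | ⟨_, h⟩ | h
        · omega
        · exact h
        · rw [hsplit] at h
          have hkw : k = w := by simpa using h
          subst hkw
          rw [PySem.Str.isIn_iff_infix]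
      simp only [hbHead, Bool.or_eq_true, List.any_eq_true]
      exact Or.inl (Or.inr ⟨k, hs, hin⟩)
    · obtain ⟨hlen3, hsp⟩ := pv_multi_facts k hm
      rcases hca with ⟨h, _⟩ | ⟨_, h⟩ | h
      · exact absurd h hlen3
      · exact absurd (((PySem.Str.isIn_iff_infix _ _).mp h).mem hsp) hw
      · have hmem : ((PySem.Str.split? k " ").getD []) ∈ pvPhrases.map (fun p => p.1 :: p.2) := by
          rw [← pv_multi_split]
          exact List.mem_map_of_mem hm
        obtain ⟨p, hp, hpe⟩ := List.mem_map.mp hmem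
        rw [← hpe, List.length_cons, List.take_succ_cons] at h
        obtain ⟨h1, h2⟩ := List.cons_eq_cons.mp h
        simp only [hbHead, Bool.or_eq_true, List.any_eq_true]
        refine Or.inr ⟨p, hp, ?_⟩
        rw [pv_slice_one]
        simp [h1, ← h2]
  · intro hb
    simp only [hbHead, Bool.or_eq_true, List.any_eq_true] at hb
    rcases hb with (hc | ⟨k, hk, hin⟩) | ⟨p, hp, hpe⟩
    · have h3 : w ∈ (pvExact3 : List String) := by simpa [PySem.Set.contains_iff] using hc
      exact ⟨w, pv_cat_mem1 w h3, Or.inl ⟨(pv_exact3_facts w h3).1, rfl⟩⟩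
    · exact ⟨k, pv_cat_mem2 k hk, Or.inr (Or.inl ⟨(pv_substr_facts k hk).1, hin⟩)⟩
    · rw [Bool.and_eq_true, beq_iff_eq, pv_slice_one, beq_iff_eq] at hpe
      obtain ⟨h1, h2⟩ := hpe
      have hmem : (p.1 :: p.2) ∈ pvMulti.map (fun k => (PySem.Str.split? k " ").getD []) := by
        rw [pv_multi_split]
        exact List.mem_map_of_mem hp
      obtain ⟨k, hkm, hke⟩ := List.mem_map.mp hmem
      refine ⟨k, pv_cat_mem3 k hkm, Or.inr (Or.inr ?_)⟩
      rw [hke, List.length_cons, List.take_succ_cons, h1, h2]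

lemma pv_aInner_cons (words : List String) (kw : String) (i : Int) (is : List Int) :
    pvAInner words kw (i :: is) = true ↔ (AcondAt words kw i ∨ pvAInner words kw is = true) := by
  simp only [pvAInner]
  split_ifs with h1 h2
  · exact iff_of_true rfl (Or.inl (h1.imp id Or.inl))
  · exact iff_of_true rfl (Or.inl (Or.inr (Or.inr h2)))
  · constructor
    · exact fun h => Or.inr h
    · rintro ((h | h | h) | h)
      exacts [absurd (Or.inl h) h1, absurd (Or.inr h) h1, absurd h h2, h]

lemma pv_aInner_iff (words : List String) (kw : String) (idxs : List Int) :
    pvAInner words kw idxs = true ↔ ∃ i ∈ idxs, AcondAt words kw i := by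
  induction idxs with
  | nil => simp [pvAInner]
  | cons i is ih =>
    rw [pv_aInner_cons, ih]
    constructor
    · rintro (h | ⟨i', hi', h⟩)
      exacts [⟨i, List.mem_cons_self, h⟩, ⟨i', List.mem_cons_of_mem _ hi', h⟩]
    · rintro ⟨i', hi', h⟩
      rcases List.mem_cons.mp hi' with rfl | hm
      exacts [Or.inl h, Or.inr ⟨i', hm, h⟩]

lemma pv_aOuter_iff (words : List String) (ks : List String) :
    pvAOuter words ks = true ↔ ∃ k ∈ ks, pvAInner words (PySem.Str.lower k) (PySem.List.pyRange 0 (words.length : Int) 1) = true := by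
  induction ks with
  | nil => simp [pvAOuter]
  | cons k ks ih =>
    simp only [pvAOuter]
    split_ifs with h
    · exact iff_of_true rfl ⟨k, List.mem_cons_self, h⟩
    · rw [ih]
      constructor
      · rintro ⟨k', hk', hh⟩
        exact ⟨k', List.mem_cons_of_mem _ hk', hh⟩
      · rintro ⟨k', hk', hh⟩
        rcases List.mem_cons.mp hk' with rfl | hm
        exacts [absurd hh h, ⟨k', hm, hh⟩]

lemma pv_acond_nat (words : List String) (kw : String) (j : Nat) (hj : j < words.length) :
    AcondAt words kw (j : Int) ↔ CAp kw (words.getD j "") (words.drop (j + 1)) := by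
  have hgd : words.getD j "" = words[j] := List.getD_eq_getElem words "" hj
  have hd : words.drop j = words.getD j "" :: words.drop (j + 1) := by
    rw [hgd]; exact List.drop_eq_getElem_cons hj
  unfold AcondAt CAp
  rw [PySem.List.pyGetD_natCast, PySem.List.slice_natCast_add, hd]

lemma pv_bScan_cons (w : String) (rest : List String) :
    pvBScan (w :: rest) = true ↔ (hbHead w rest = true ∨ pvBScan rest = true) := by
  simp only [pvBScan, hbHead]
  split_ifs with h1 h2 h3 <;> simp_all

lemma pv_bScan_iff (ws : List String) :
    pvBScan ws = true ↔ ∃ j : Nat, j < ws.length ∧ hbHead (ws.getD j "") (ws.drop (j + 1)) = true := by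
  induction ws with
  | nil => simp [pvBScan]
  | cons w ws ih =>
    rw [pv_bScan_cons, ih]
    constructor
    · rintro (h | ⟨j, hj, h⟩)
      · exact ⟨0, by simp, by simpa using h⟩
      · exact ⟨j + 1, by simpa using hj, by simpa using h⟩
    · rintro ⟨j, hj, h⟩
      cases j with
      | zero => exact Or.inl (by simpa using h)
      | succ j => exact Or.inr ⟨j, by simpa using hj, by simpa using h⟩

lemma pv_main (words : List String) (hw : ∀ w ∈ words, ' ' ∉ w.toList) :
    pvAOuter words secKeywords = pvBScan words := by
  rw [Bool.eq_iff_iff, pv_aOuter_iff, pv_bScan_iff]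
  have hmem : ∀ j, j < words.length → words.getD j "" ∈ words := by
    intro j hj
    rw [List.getD_eq_getElem words "" hj]
    exact List.getElem_mem hj
  constructor
  · rintro ⟨k, hk, hin⟩
    rw [pv_lower_kw k hk, pv_aInner_iff] at hin
    obtain ⟨i, hi, hc⟩ := hin
    obtain ⟨h0, hlt⟩ := PySem.List.mem_pyRange_one.mp hi
    have hji : ((i.toNat : Nat) : Int) = i := Int.toNat_of_nonneg h0
    have hj : i.toNat < words.length := by omega
    rw [← hji, pv_acond_nat _ _ _ hj] at hc
    exact ⟨i.toNat, hj, (pv_head_equiv _ _ (hw _ (hmem _ hj))).mp ⟨k, hk, hc⟩⟩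
  · rintro ⟨j, hj, hb⟩
    obtain ⟨k, hk, hc⟩ := (pv_head_equiv _ _ (hw _ (hmem _ hj))).mpr hb
    refine ⟨k, hk, ?_⟩
    rw [pv_lower_kw k hk, pv_aInner_iff]
    refine ⟨(j : Int), PySem.List.mem_pyRange_one.mpr ⟨by omega, by omega⟩, ?_⟩
    exact (pv_acond_nat _ _ _ hj).mpr hc

lemma pv_lowerChar_space (c : Char) (h : PySem.Chars.lowerChar c = ' ') : c = ' ' := by
  unfold PySem.Chars.lowerChar at h
  split_ifs at h with hu
  · exfalso
    simp only [PySem.Chars.isupper, Bool.and_eq_true, decide_eq_true_eq] at hu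
    have h1 : 65 ≤ c.toNat := Fin.mk_le_mk.mp hu.1
    have h2 : c.toNat ≤ 90 := Fin.mk_le_mk.mp hu.2
    have hval : (c.toNat + 32).isValidChar := Or.inl (by omega)
    have ht := congrArg Char.toNat h
    rw [Char.toNat_ofNat, if_pos hval] at ht
    have hsp : (' ' : Char).toNat = 32 := rfl
    omega
  · exact h

lemma pv_go_spacefree : ∀ (fuel : Nat) (l cur : List Char) (acc : List (List Char)),
    l.length < fuel → ' ' ∉ cur → (∀ p ∈ acc, ' ' ∉ p) →
    ∀ p ∈ PySem.Chars.splitOn.go [' '] fuel l cur acc, ' ' ∉ p := by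
  intro fuel
  induction fuel with
  | zero => intro l cur acc hl; omega
  | succ fuel ih =>
    intro l cur acc hl hcur hacc p hp
    cases l with
    | nil =>
      simp only [PySem.Chars.splitOn.go, List.mem_reverse, List.mem_cons] at hp
      rcases hp with rfl | hp
      · simpa using hcur
      · exact hacc p hp
    | cons c restl =>
      simp only [PySem.Chars.splitOn.go] at hp
      by_cases hpre : [' '].isPrefixOf (c :: restl) = true
      · rw [if_pos hpre] at hp
        refine ih (List.drop [' '].length (c :: restl)) [] (cur.reverse :: acc) ?_ (by simp) ?_ p hp
        · simp at hl ⊢; omega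
        · intro q hq
          rcases List.mem_cons.mp hq with rfl | hq
          · simpa using hcur
          · exact hacc q hq
      · rw [if_neg hpre] at hp
        have hc : ¬ c = ' ' := by
          intro hc
          exact hpre (by simp [List.isPrefixOf, hc])
        refine ih restl (c :: cur) acc (by simp at hl ⊢; omega) ?_ hacc p hp
        intro hq
        rcases List.mem_cons.mp hq with hq | hq
        · exact hc hq.symm
        · exact hcur hq

lemma pv_words_spacefree (text : String) :
    ∀ w ∈ ((PySem.Str.split? text " ").getD []).map PySem.Str.lower, ' ' ∉ w.toList := by
  intro w hwm
  obtain ⟨piece, hp, rfl⟩ := List.mem_map.mp hwm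
  have hsplit : (PySem.Str.split? text " ").getD [] = (PySem.Chars.splitOn text.toList [' ']).map String.ofList := by
    have hsep : (" " : String).toList = [' '] := by decide
    simp [PySem.Str.split?, PySem.Chars.split?, hsep]
  rw [hsplit] at hp
  obtain ⟨cs, hcs, rfl⟩ := List.mem_map.mp hp
  rw [PySem.Str.toList_lower, String.toList_ofList]
  intro hsp
  obtain ⟨c, hc, hlc⟩ := List.mem_map.mp (by simpa [PySem.Chars.lower] using hsp)
  have hce := pv_lowerChar_space c hlc
  subst hce
  have hfree : ∀ p ∈ PySem.Chars.splitOn text.toList [' '], ' ' ∉ p := by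
    intro p hpm
    exact pv_go_spacefree (text.toList.length + 1) text.toList [] [] (Nat.lt_succ_self _)
      (by simp) (by simp) p (by simpa [PySem.Chars.splitOn] using hpm)
  exact hfree cs hcs hc

-- ===== VERDICT (by name: the statement is the Claim_ definition above) =====
theorem is_security_related_text_spec : Claim_equal_is_security_related_text := by
  intro text _
  unfold Spec_is_security_related_text is_security_related_text is_security_related_text_alt
  exact pv_main _ (pv_words_spacefree text)
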